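-- pv_equiv track=rewrite | github.com/IgnacyBerent/AoC_2023_python | day_12/task_1.py | find_groups_lengths
-- ===== SOURCE A (Python) =====
-- def find_groups_lengths(record: str | list[str]) -> list[int]:
--     groups = []
--     new_group = 0
--     for char in record:
--         if char != '.':
--             new_group += 1
--         else:
--             if new_group != 0:
--                 groups.append(new_group)
--                 new_group = 0
--     if new_group != 0:
--         groups.append(new_group)
--     return groups
-- ===== SOURCE B (Python) =====
-- def find_groups_lengths(record):
--     n = len(record)
--     dots = [i for i, c in enumerate(record) if c == '.']
--     bounds = [-1] + dots + [n]
--     return [b - a - 1 for a, b in zip(bounds, bounds[1:]) if b - a > 1]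
-- ===== Notes on version B (the rewrite author's own statement) =====
-- stated objective: alternative
-- what changed: B first collects the indices of all dots, brackets them with sentinels -1 and len(record), and derives each group length as the gap between consecutive dot indices minus one, instead of A's running-counter scan with flush-at-boundary.
import Mathlib
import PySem

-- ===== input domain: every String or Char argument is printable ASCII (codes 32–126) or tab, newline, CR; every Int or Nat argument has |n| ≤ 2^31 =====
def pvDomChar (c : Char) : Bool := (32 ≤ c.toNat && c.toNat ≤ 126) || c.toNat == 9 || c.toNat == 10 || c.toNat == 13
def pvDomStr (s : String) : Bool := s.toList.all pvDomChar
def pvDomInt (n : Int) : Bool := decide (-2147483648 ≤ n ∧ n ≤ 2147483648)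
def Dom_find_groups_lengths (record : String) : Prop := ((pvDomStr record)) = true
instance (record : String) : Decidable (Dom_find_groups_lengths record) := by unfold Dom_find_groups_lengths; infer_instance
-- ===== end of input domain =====

-- B derives each group length as the gap between consecutive dot indices (bracketed by
-- sentinels -1 and len) instead of A's running counter; same O(n) cost, different algorithm.

-- ===== PORT A =====
-- literal transliteration of A's loop: state = (groups, new_group)
def find_groups_lengths (record : String) : List Int :=
  let st := record.toList.foldl
    (fun (st : List Int × Int) char =>
      if char ≠ '.' then (st.1, st.2 + 1)
      else if st.2 ≠ 0 then (st.1 ++ [st.2], (0 : Int)) else (st.1, st.2))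
    ([], 0)
  if st.2 ≠ 0 then st.1 ++ [st.2] else st.1

-- ===== PORT B =====
-- dots = [i for i, c in enumerate(record) if c == '.']; bounds = [-1] + dots + [n];
-- [b - a - 1 for a, b in zip(bounds, bounds[1:]) if b - a > 1]
def find_groups_lengths_alt (record : String) : List Int :=
  let cs := record.toList
  let n : Int := (cs.length : Int)
  let dots : List Int :=
    (PySem.List.enumerate cs).filterMap (fun p => if p.2 = '.' then some p.1 else none)
  let bounds : List Int := (-1) :: (dots ++ [n])
  (bounds.zip bounds.tail).filterMap
    (fun p => if p.2 - p.1 > 1 then some (p.2 - p.1 - 1) else none)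

-- ===== PRECONDITION & SPEC =====
def Spec_find_groups_lengths (record : String) (out : List Int) : Prop := out = find_groups_lengths_alt record
instance (record : String) (out : List Int) : Decidable (Spec_find_groups_lengths record out) := by unfold Spec_find_groups_lengths; infer_instance

-- ===== CLAIM (what is proved, stated in full; the proofs are below) =====
def Claim_equal_find_groups_lengths : Prop := ∀ (record : String), Dom_find_groups_lengths record → Spec_find_groups_lengths record (find_groups_lengths record)

-- ===== LEMMAS AND PROOFS =====

-- char-by-char characterisation of A's result from state (groups, n): A = groups ++ pvExt n cs
def pvExt (n : Int) : List Char → List Int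
  | [] => if n = 0 then [] else [n]
  | c :: cs => if c = '.' then (if n = 0 then pvExt 0 cs else n :: pvExt 0 cs) else pvExt (n + 1) cs

def pvStep (st : List Int × Int) (char : Char) : List Int × Int :=
  if char ≠ '.' then (st.1, st.2 + 1)
  else if st.2 ≠ 0 then (st.1 ++ [st.2], (0 : Int)) else (st.1, st.2)

def pvFinish (st : List Int × Int) : List Int := if st.2 ≠ 0 then st.1 ++ [st.2] else st.1

theorem pvFold_ext (cs : List Char) : ∀ (g : List Int) (n : Int),
    pvFinish (cs.foldl pvStep (g, n)) = g ++ pvExt n cs := by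
  induction cs with
  | nil =>
    intro g n
    simp [pvFinish, pvExt]
    split_ifs with h
    · simp [h]
    · simp [h]
  | cons c cs ih =>
    intro g n
    simp only [List.foldl_cons]
    by_cases hc : c = '.'
    · by_cases hn : n = 0
      · simp [pvStep, pvExt, hc, hn, ih]
      · simp [pvStep, pvExt, hc, hn, ih]
    · simp [pvStep, pvExt, hc, ih]

-- gap-scan characterisation of B: prev = index of the previous dot (or -1), k = current index
def pvGaps (prev k : Int) : List Char → List Int
  | [] => if k - prev > 1 then [k - prev - 1] else []
  | c :: cs => if c = '.' then
      (if k - prev > 1 then (k - prev - 1) :: pvGaps k (k + 1) cs else pvGaps k (k + 1) cs)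
    else pvGaps prev (k + 1) cs

-- position-indexed dot list
def pvDots (k : Int) : List Char → List Int
  | [] => []
  | c :: cs => if c = '.' then k :: pvDots (k + 1) cs else pvDots (k + 1) cs

theorem pvEnum_dots (cs : List Char) : ∀ (k : Int),
    (PySem.List.enumerate cs k).filterMap (fun p => if p.2 = '.' then some p.1 else none)
      = pvDots k cs := by
  induction cs with
  | nil => intro k; simp [PySem.List.enumerate_nil, pvDots]
  | cons c cs ih =>
    intro k
    by_cases hc : c = '.'
    · simp [PySem.List.enumerate_cons, List.filterMap_cons, hc, pvDots, ih]
    · simp [PySem.List.enumerate_cons, List.filterMap_cons, hc, pvDots, ih]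

-- B's zip-of-bounds pipeline equals the gap scan
theorem pvZip_gaps (cs : List Char) : ∀ (prev k : Int),
    (((prev :: (pvDots k cs ++ [k + (cs.length : Int)])).zip
        (pvDots k cs ++ [k + (cs.length : Int)])).filterMap
      (fun p => if p.2 - p.1 > 1 then some (p.2 - p.1 - 1) else none))
      = pvGaps prev k cs := by
  induction cs with
  | nil =>
    intro prev k
    simp [pvDots, pvGaps, List.zip, List.filterMap_cons]
    split_ifs with h <;> simp
  | cons c cs ih =>
    intro prev k
    by_cases hc : c = '.'
    · have h1 : pvDots k (c :: cs) = k :: pvDots (k + 1) cs := by simp [pvDots, hc]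
      have h2 : k + ((c :: cs).length : Int) = (k + 1) + (cs.length : Int) := by
        simp; ring
      rw [h1, h2]
      simp only [List.cons_append, List.zip_cons_cons, List.filterMap_cons]
      rw [ih k (k + 1)]
      simp only [pvGaps, if_pos hc]
      split_ifs with h <;> simp
    · have h1 : pvDots k (c :: cs) = pvDots (k + 1) cs := by simp [pvDots, hc]
      have h2 : k + ((c :: cs).length : Int) = (k + 1) + (cs.length : Int) := by
        simp; ring
      rw [h1, h2, ih prev (k + 1)]
      simp [pvGaps, hc]

-- the gap scan equals A's characterisation
theorem pvGaps_ext (cs : List Char) : ∀ (prev k : Int), prev < k →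
    pvGaps prev k cs = pvExt (k - prev - 1) cs := by
  induction cs with
  | nil =>
    intro prev k h
    simp [pvGaps, pvExt]
    split_ifs with h1 h2 h2 <;> first | rfl | omega
  | cons c cs ih =>
    intro prev k h
    by_cases hc : c = '.'
    · by_cases hg : k - prev > 1
      · have : ¬ (k - prev - 1 = 0) := by omega
        simp [pvGaps, pvExt, hc, hg, this, ih k (k + 1) (by omega)]
      · have : k - prev - 1 = 0 := by omega
        simp [pvGaps, pvExt, hc, hg, this, ih k (k + 1) (by omega)]
    · have : k + 1 - prev - 1 = (k - prev - 1) + 1 := by omega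
      simp [pvGaps, pvExt, hc, ih prev (k + 1) (by omega), this]

-- ===== VERDICT (by name: the statement is the Claim_ definition above) =====
theorem find_groups_lengths_spec : Claim_equal_find_groups_lengths := by
  intro record _
  show find_groups_lengths record = find_groups_lengths_alt record
  have hfold : find_groups_lengths record = pvFinish (record.toList.foldl pvStep ([], 0)) := rfl
  rw [hfold, pvFold_ext, List.nil_append]
  unfold find_groups_lengths_alt
  simp only [pvEnum_dots, List.tail_cons]
  have hB := pvZip_gaps record.toList (-1) 0
  simp only [zero_add] at hB
  rw [hB, pvGaps_ext record.toList (-1) 0 (by omega)]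
  norm_num
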